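-- pv_equiv track=rewrite | github.com/AntonioFranciulli/Recomendify | biblioteca.py | reconstruir_nombres_canciones
-- ===== SOURCE A (Python) =====
-- def reconstruir_nombres_canciones(lista):
--     cancion = ''
--     resultado = []
--     for i in range(len(lista)):
--         if lista[i] != ">>>>":
--             cancion+="{} ".format(lista[i])
--         else:
--             resultado.append(cancion.strip())
--             cancion = ''
--             continue
--
--     resultado.append(cancion.strip())
--     return resultado
-- ===== SOURCE B (Python) =====
-- def reconstruir_nombres_canciones(lista):
--     # Phase 1: split the token list into segments between ">>>>" delimiters.
--     segmentos = [[]]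
--     for elemento in lista:
--         if elemento == ">>>>":
--             segmentos.append([])
--         else:
--             segmentos[-1].append("{}".format(elemento))
--     # Phase 2: render each segment as a space-joined, stripped string.
--     return [" ".join(segmento).strip() for segmento in segmentos]
-- ===== Notes on version B (the rewrite author's own statement) =====
-- stated objective: alternative
-- what changed: Instead of accumulating a running 'word + space' string and emitting it at each delimiter, B first splits the list into token segments between delimiters and then renders each segment with ' '.join(...).strip() in a separate pass.
import Mathlib
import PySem

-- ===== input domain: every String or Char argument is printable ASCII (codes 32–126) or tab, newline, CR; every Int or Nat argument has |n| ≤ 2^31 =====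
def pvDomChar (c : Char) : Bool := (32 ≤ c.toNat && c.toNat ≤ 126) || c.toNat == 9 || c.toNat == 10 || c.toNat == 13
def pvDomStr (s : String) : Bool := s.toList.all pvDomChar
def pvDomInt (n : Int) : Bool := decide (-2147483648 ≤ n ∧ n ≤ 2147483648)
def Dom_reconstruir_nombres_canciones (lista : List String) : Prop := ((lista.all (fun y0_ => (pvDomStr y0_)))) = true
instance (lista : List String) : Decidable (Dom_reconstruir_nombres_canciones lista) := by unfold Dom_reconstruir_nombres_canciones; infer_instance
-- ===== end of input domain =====

-- B rebuilds the same output by first splitting the list into token segments between ">>>>"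
-- delimiters and then rendering each segment with ' '.join(...).strip() in a second pass,
-- instead of A's running string accumulation with in-loop result appends (alternative decomposition).

-- ===== PORT A =====
def reconstruir_nombres_canciones (lista : List String) : List String :=
  let st := lista.foldl
    (fun (st : String × List String) x =>
      if x != ">>>>" then (st.1 ++ x ++ " ", st.2)
      else ("", st.2 ++ [PySem.Str.strip st.1]))
    ("", [])
  st.2 ++ [PySem.Str.strip st.1]

-- ===== PORT B =====
def reconstruir_nombres_canciones_alt (lista : List String) : List String :=
  let segmentos := lista.foldl
    (fun (segs : List (List String)) x =>
      if x == ">>>>" then segs ++ [([] : List String)]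
      else segs.dropLast ++ [segs.getLastD [] ++ [x]])
    [[]]
  segmentos.map (fun seg => PySem.Str.strip (PySem.Str.join " " seg))

-- ===== PRECONDITION & SPEC =====
def Spec_reconstruir_nombres_canciones (lista : List String) (out : List String) : Prop := out = reconstruir_nombres_canciones_alt lista
instance (lista : List String) (out : List String) : Decidable (Spec_reconstruir_nombres_canciones lista out) := by unfold Spec_reconstruir_nombres_canciones; infer_instance

-- ===== CLAIM (what is proved, stated in full; the proofs are below) =====
def Claim_equal_reconstruir_nombres_canciones : Prop := ∀ (lista : List String), Dom_reconstruir_nombres_canciones lista → Spec_reconstruir_nombres_canciones lista (reconstruir_nombres_canciones lista)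

-- ===== LEMMAS AND PROOFS =====

-- A's running accumulation over one segment, starting from the string c.
def pvFA (c : String) (seg : List String) : String :=
  seg.foldl (fun a x => a ++ x ++ " ") c

-- The loop body of port A, named for the proofs (definitionally the lambda in the port).
def pvAStep (st : String × List String) (x : String) : String × List String :=
  if x != ">>>>" then (st.1 ++ x ++ " ", st.2) else ("", st.2 ++ [PySem.Str.strip st.1])

-- A's loop, started at (c, res), emits the splitOn segments (the first one prefixed by c).
theorem pvA_loop (l : List String) : ∀ (c : String) (res : List String)
    (s0 : List String) (rest : List (List String)),
    List.splitOn ">>>>" l = s0 :: rest →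
    (l.foldl pvAStep (c, res)).2 ++ [PySem.Str.strip (l.foldl pvAStep (c, res)).1]
    = res ++ PySem.Str.strip (pvFA c s0)
        :: rest.map (fun s => PySem.Str.strip (pvFA "" s)) := by
  induction l with
  | nil =>
    intro c res s0 rest h
    simp [List.splitOn, List.splitOnP_nil] at h
    obtain ⟨h1, h2⟩ := h
    subst h1; subst h2
    simp [pvFA]
  | cons x xs ih =>
    intro c res s0 rest h
    obtain ⟨s1, r1, h1⟩ : ∃ s1 r1, List.splitOn ">>>>" xs = s1 :: r1 :=
      List.exists_cons_of_ne_nil (by rw [List.splitOn]; exact List.splitOnP_ne_nil _ xs)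
    rw [List.splitOn, List.splitOnP_cons] at h
    by_cases hx : x = ">>>>"
    · simp only [hx, beq_self_eq_true, if_pos] at h
      rw [show List.splitOnP (fun x => x == ">>>>") xs = List.splitOn ">>>>" xs from rfl, h1] at h
      injection h with h2 h3
      subst h2; subst h3
      rw [List.foldl_cons,
        show pvAStep (c, res) x = ("", res ++ [PySem.Str.strip c]) from by simp [pvAStep, hx],
        ih "" (res ++ [PySem.Str.strip c]) s1 r1 h1]
      simp [pvFA]
    · have hbx : (x == ">>>>") = false := by simp [hx]
      simp only [hbx, Bool.false_eq_true, if_false] at h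
      rw [show List.splitOnP (fun x => x == ">>>>") xs = List.splitOn ">>>>" xs from rfl, h1] at h
      rw [List.modifyHead_cons] at h
      injection h with h2 h3
      subst h2; subst h3
      rw [List.foldl_cons,
        show pvAStep (c, res) x = (c ++ x ++ " ", res) from by simp [pvAStep]; exact hx,
        ih (c ++ x ++ " ") res s1 r1 h1]
      simp [pvFA]

theorem pvA_eq (l : List String) :
    reconstruir_nombres_canciones l
      = (List.splitOn ">>>>" l).map (fun s => PySem.Str.strip (pvFA "" s)) := by
  obtain ⟨s0, rest, h⟩ : ∃ s0 rest, List.splitOn ">>>>" l = s0 :: rest :=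
    List.exists_cons_of_ne_nil (by rw [List.splitOn]; exact List.splitOnP_ne_nil _ l)
  simp only [reconstruir_nombres_canciones]
  rw [show (fun (st : String × List String) x =>
      if x != ">>>>" then (st.1 ++ x ++ " ", st.2)
      else ("", st.2 ++ [PySem.Str.strip st.1])) = pvAStep from rfl]
  rw [pvA_loop l "" [] s0 rest h, h]
  simp

-- B's loop from state acc ++ [cur] appends the remaining segments, the first prefixed by cur.
theorem pvB_loop (l : List String) : ∀ (acc : List (List String)) (cur : List String),
    l.foldl
      (fun (segs : List (List String)) x =>
        if x == ">>>>" then segs ++ [([] : List String)]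
        else segs.dropLast ++ [segs.getLastD [] ++ [x]])
      (acc ++ [cur])
    = acc ++ List.modifyHead (cur ++ ·) (List.splitOn ">>>>" l) := by
  induction l with
  | nil =>
    intro acc cur
    simp [List.splitOn, List.splitOnP_nil]
  | cons x xs ih =>
    intro acc cur
    obtain ⟨s1, r1, h1⟩ := List.exists_cons_of_ne_nil (List.splitOnP_ne_nil (· == ">>>>") xs)
    rw [show List.splitOnP (· == ">>>>") xs = List.splitOn ">>>>" xs from rfl] at h1
    by_cases hx : x = ">>>>"
    · rw [List.splitOn, List.splitOnP_cons]
      simp only [List.foldl_cons, hx]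
      simp only [beq_self_eq_true, if_pos]
      rw [show (acc ++ [cur]) ++ [([] : List String)] = (acc ++ [cur]) ++ [([] : List String)] from rfl]
      rw [ih (acc ++ [cur]) []]
      rw [show List.splitOnP (· == ">>>>") xs = List.splitOn ">>>>" xs from rfl]
      rw [h1]
      simp
    · rw [List.splitOn, List.splitOnP_cons]
      simp only [List.foldl_cons]
      have hbx : (x == ">>>>") = false := by simp [hx]
      simp only [hbx, if_false, Bool.false_eq_true, List.dropLast_concat, List.getLastD_concat]
      rw [ih acc (cur ++ [x])]
      rw [show List.splitOnP (· == ">>>>") xs = List.splitOn ">>>>" xs from rfl]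
      rw [h1]
      simp

theorem pvB_eq (l : List String) :
    reconstruir_nombres_canciones_alt l
      = (List.splitOn ">>>>" l).map (fun seg => PySem.Str.strip (PySem.Str.join " " seg)) := by
  obtain ⟨s0, rest, h⟩ := List.exists_cons_of_ne_nil (List.splitOnP_ne_nil (· == ">>>>") l)
  rw [show List.splitOnP (· == ">>>>") l = List.splitOn ">>>>" l from rfl] at h
  simp only [reconstruir_nombres_canciones_alt]
  have hb := pvB_loop l [] []
  simp only [List.nil_append] at hb
  rw [hb, h]
  simp

-- Characters of A's per-segment accumulation.
theorem pvFA_toList (seg : List String) : ∀ (c : String),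
    (pvFA c seg).toList = c.toList ++ seg.flatMap (fun s => s.toList ++ [' ']) := by
  induction seg with
  | nil => intro c; simp [pvFA]
  | cons x xs ih =>
    intro c
    simp only [pvFA, List.foldl_cons] at *
    rw [ih (c ++ x ++ " ")]
    simp [String.toList_append, show (" " : String).toList = [' '] from rfl]

theorem pvFlatMap_intercalate : ∀ (cs : List (List Char)), cs ≠ [] →
    cs.flatMap (fun s => s ++ [' ']) = List.intercalate [' '] cs ++ [' '] := by
  intro cs
  induction cs with
  | nil => intro h; exact absurd rfl h
  | cons x t ih =>
    intro _
    cases t with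
    | nil => simp [List.intercalate]
    | cons y t2 =>
      rw [List.flatMap_cons, ih (by simp)]
      rw [show List.intercalate [' '] (x :: y :: t2) = x ++ [' '] ++ List.intercalate [' '] (y :: t2) from by
        simp [List.intercalate, List.intersperse]]
      simp

-- Python's .strip() ignores one trailing space: strip (l ++ [' ']) = strip l.
theorem pvStrip_concat_space (l : List Char) :
    PySem.Chars.strip (l ++ [' ']) = PySem.Chars.strip l := by
  have hsp : PySem.Chars.isspace ' ' = true := by decide
  simp only [PySem.Chars.strip, PySem.Chars.lstrip, PySem.Chars.rstrip]
  by_cases h : (List.dropWhile PySem.Chars.isspace l).isEmpty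
  · rw [List.dropWhile_append, if_pos h]
    rw [List.isEmpty_iff] at h
    rw [h]
    simp [hsp]
  · rw [List.dropWhile_append, if_neg h]
    rw [List.reverse_append]
    simp [hsp]

-- Per segment, A's accumulated string strips to the same value as ' '.join(segment).strip().
theorem pvJ (seg : List String) :
    PySem.Str.strip (pvFA "" seg) = PySem.Str.strip (PySem.Str.join " " seg) := by
  simp only [PySem.Str.strip, PySem.Str.join]
  apply congrArg String.ofList
  rw [String.toList_ofList]
  rw [pvFA_toList seg ""]
  simp only [PySem.Chars.join, show ("" : String).toList = [] from rfl,
    show (" " : String).toList = [' '] from rfl, List.nil_append]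
  rw [show (seg.flatMap fun s => s.toList ++ [' ']) = (seg.map String.toList).flatMap (fun s => s ++ [' ']) from by
    simp [List.flatMap_map]]
  cases hm : seg.map String.toList with
  | nil => simp [List.intercalate]
  | cons a t =>
    rw [pvFlatMap_intercalate (a :: t) (by simp)]
    rw [pvStrip_concat_space]

-- ===== VERDICT (by name: the statement is the Claim_ definition above) =====
theorem reconstruir_nombres_canciones_spec : Claim_equal_reconstruir_nombres_canciones := by
  intro lista _
  unfold Spec_reconstruir_nombres_canciones
  rw [pvA_eq, pvB_eq]
  exact List.map_congr_left (fun s _ => pvJ s)
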